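-- pv_equiv track=rewrite | github.com/reml-group/Deliberation-on-Priors | data_process/load_data.py | expand_paths
-- ===== SOURCE A (Python) =====
-- def expand_paths(compressed_paths):
--     # 展开路径的辅助函数
--     def backtrack(current_path, index, path):
--         # 如果当前路径已经包含了所有节点对，则将其添加到结果中
--         if len(current_path) == len(path):
--             result.append(current_path[:])
--             return
--         for i in range(index, len(path)):
--             node, rel_list, next_node = path[i]
--             # 遍历当前节点的所有关系
--             for rel in rel_list:
--                 # 将当前关系添加到路径中，并递归处理剩余的路径
--                 current_path.append((node, rel, next_node))
--                 backtrack(current_path, i+1, path)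
--                 current_path.pop()
--
--     result = []
--     current_path = []
--     for path in compressed_paths:
--         backtrack(current_path, 0, path)
--     return result
-- ===== SOURCE B (Python) =====
-- def expand_paths(compressed_paths):
--     result = []
--     for path in compressed_paths:
--         combos = [[]]
--         for node, rel_list, next_node in path:
--             new_combos = []
--             for combo in combos:
--                 for rel in rel_list:
--                     new_combos.append(combo + [(node, rel, next_node)])
--             combos = new_combos
--         result.extend(combos)
--     return result
-- ===== Notes on version B (the rewrite author's own statement) =====
-- stated objective: alternative
-- what changed: Replaces the recursive backtracking with its skip-ahead loop over later positions by an iterative frontier of partial combos rebuilt position by position, extending each partial combo with every relation choice.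
import Mathlib
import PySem

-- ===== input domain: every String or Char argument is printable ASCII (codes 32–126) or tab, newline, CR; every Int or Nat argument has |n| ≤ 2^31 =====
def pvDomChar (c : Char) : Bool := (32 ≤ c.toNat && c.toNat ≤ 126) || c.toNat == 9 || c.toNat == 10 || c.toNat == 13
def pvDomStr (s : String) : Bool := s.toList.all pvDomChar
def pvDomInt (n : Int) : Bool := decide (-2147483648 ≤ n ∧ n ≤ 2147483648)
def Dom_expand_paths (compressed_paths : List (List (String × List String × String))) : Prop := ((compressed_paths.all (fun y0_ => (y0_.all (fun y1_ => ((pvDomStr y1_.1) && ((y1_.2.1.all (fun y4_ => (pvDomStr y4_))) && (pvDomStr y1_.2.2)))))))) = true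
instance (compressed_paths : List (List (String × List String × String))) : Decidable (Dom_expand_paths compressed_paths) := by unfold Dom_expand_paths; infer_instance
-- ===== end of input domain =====

-- B replaces A's recursive backtracking (which explores dead skip-ahead branches) with an
-- iterative frontier of partial combos rebuilt per path position; same return value.


-- ===== PORT A =====
-- A's `for i in range(index, len(path))` is transcribed as recursion over the suffix of
-- `path` starting at `index` (pvLoopP); the inner `for rel in rel_list` is pvRelLoop;
-- `backtrack` itself is pvBtk.  `result` is threaded as the accumulator `acc`.
mutual
def pvBtk (plen : Nat) (cur : List (String × String × String))
    (rest : List (String × List String × String))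
    (acc : List (List (String × String × String))) : List (List (String × String × String)) :=
  if cur.length = plen then acc ++ [cur]
  else pvLoopP plen cur rest acc
termination_by (rest.length, 2, 0)

def pvLoopP (plen : Nat) (cur : List (String × String × String))
    (rest : List (String × List String × String))
    (acc : List (List (String × String × String))) : List (List (String × String × String)) :=
  match rest with
  | [] => acc
  | (node, rels, nxt) :: r =>
    pvLoopP plen cur r (pvRelLoop plen cur node nxt r rels acc)
termination_by (rest.length, 1, 0)

def pvRelLoop (plen : Nat) (cur : List (String × String × String)) (node nxt : String)
    (r : List (String × List String × String)) (rels : List String)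
    (acc : List (List (String × String × String))) : List (List (String × String × String)) :=
  match rels with
  | [] => acc
  | rel :: rs =>
    pvRelLoop plen cur node nxt r rs (pvBtk plen (cur ++ [(node, rel, nxt)]) r acc)
termination_by (r.length, 2, rels.length)
end

def expand_paths (compressed_paths : List (List (String × List String × String))) : List (List (String × String × String)) :=
  compressed_paths.foldl (fun result path => pvBtk path.length [] path result) []

-- ===== PORT B =====
def expand_paths_alt (compressed_paths : List (List (String × List String × String))) : List (List (String × String × String)) :=
  compressed_paths.foldl (fun result path =>
    result ++ path.foldl (fun combos t =>
      combos.foldl (fun new_combos combo =>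
        t.2.1.foldl (fun new_combos rel => new_combos ++ [combo ++ [(t.1, rel, t.2.2)]]) new_combos) []) [[]]) []

-- ===== PRECONDITION & SPEC =====
def Spec_expand_paths (compressed_paths : List (List (String × List String × String))) (out : List (List (String × String × String))) : Prop := out = expand_paths_alt compressed_paths
instance (compressed_paths : List (List (String × List String × String))) (out : List (List (String × String × String))) : Decidable (Spec_expand_paths compressed_paths out) := by unfold Spec_expand_paths; infer_instance

-- ===== CLAIM (what is proved, stated in full; the proofs are below) =====
def Claim_equal_expand_paths : Prop := ∀ (compressed_paths : List (List (String × List String × String))), Dom_expand_paths compressed_paths → Spec_expand_paths compressed_paths (expand_paths compressed_paths)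

-- ===== LEMMAS AND PROOFS =====

-- the Cartesian product of the relation choices along a path, earlier positions varying slowest
def pvProd : List (String × List String × String) → List (List (String × String × String))
  | [] => [[]]
  | (node, rels, nxt) :: r => rels.flatMap (fun rel => (pvProd r).map (fun c => (node, rel, nxt) :: c))

-- A's dead skip-ahead branches never append anything
theorem pv_dead (rest : List (String × List String × String)) (plen : Nat) :
    (∀ cur acc, cur.length + rest.length < plen → pvBtk plen cur rest acc = acc) ∧
    (∀ cur acc, cur.length + rest.length < plen → pvLoopP plen cur rest acc = acc) := by
  induction rest with
  | nil =>
    constructor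
    · intro cur acc h
      simp only [List.length_nil] at h
      have hne : ¬ (cur.length = plen) := by omega
      rw [pvBtk, if_neg hne, pvLoopP]
    · intro cur acc h; rw [pvLoopP]
  | cons t r ih =>
    obtain ⟨node, rels, nxt⟩ := t
    have hrel : ∀ rels cur acc, cur.length + (r.length + 1) < plen →
        pvRelLoop plen cur node nxt r rels acc = acc := by
      intro rels
      induction rels with
      | nil => intro cur acc h; rw [pvRelLoop]
      | cons rel rs ihr =>
        intro cur acc h
        have hb : (cur ++ [(node, rel, nxt)]).length + r.length < plen := by
          simp only [List.length_append, List.length_cons, List.length_nil]; omega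
        rw [pvRelLoop, ih.1 (cur ++ [(node, rel, nxt)]) acc hb, ihr cur acc h]
    have hloop : ∀ cur acc, cur.length + (r.length + 1) < plen →
        pvLoopP plen cur ((node, rels, nxt) :: r) acc = acc := by
      intro cur acc h
      rw [pvLoopP, hrel rels cur acc h, ih.2 cur acc (by omega)]
    constructor
    · intro cur acc h
      simp only [List.length_cons] at h
      have hne : ¬ (cur.length = plen) := by omega
      rw [pvBtk, if_neg hne]
      exact hloop cur acc h
    · intro cur acc h
      simp only [List.length_cons] at h
      exact hloop cur acc h

-- A's backtracking on an aligned suffix appends exactly cur ++ each product of the suffix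
theorem pv_main (rest : List (String × List String × String)) (plen : Nat) :
    ∀ cur acc, cur.length + rest.length = plen →
      pvBtk plen cur rest acc = acc ++ (pvProd rest).map (fun d => cur ++ d) := by
  induction rest with
  | nil =>
    intro cur acc h
    simp only [List.length_nil] at h
    rw [pvBtk, if_pos (by omega)]
    simp [pvProd]
  | cons t r ih =>
    obtain ⟨node, rels, nxt⟩ := t
    intro cur acc h
    simp only [List.length_cons] at h
    have hrel : ∀ rels acc,
        pvRelLoop plen cur node nxt r rels acc
          = acc ++ rels.flatMap (fun rel => (pvProd r).map (fun d => cur ++ ((node, rel, nxt) :: d))) := by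
      intro rels
      induction rels with
      | nil => intro acc; simp [pvRelLoop]
      | cons rel rs ihr =>
        intro acc
        have ha : (cur ++ [(node, rel, nxt)]).length + r.length = plen := by
          simp only [List.length_append, List.length_cons, List.length_nil]; omega
        rw [pvRelLoop, ih (cur ++ [(node, rel, nxt)]) acc ha, ihr]
        simp [List.flatMap_cons, List.append_assoc]
    have hne : ¬ (cur.length = plen) := by omega
    rw [pvBtk, if_neg hne, pvLoopP, hrel,
        (pv_dead r plen).2 cur _ (by omega)]
    simp [pvProd, List.map_flatMap, Function.comp_def]

-- generic loop-shape lemmas for B's folds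
theorem pv_foldl_ext {α β : Type} (f g : β → α → β) (h : ∀ b a, f b a = g b a) :
    ∀ (l : List α) (init : β), l.foldl f init = l.foldl g init := by
  intro l
  induction l with
  | nil => intro init; rfl
  | cons x xs ih => intro init; simp only [List.foldl_cons, h, ih]

theorem pv_foldl_append {α β : Type} (g : α → List β) :
    ∀ (l : List α) (init : List β), l.foldl (fun acc x => acc ++ g x) init = init ++ l.flatMap g := by
  intro l
  induction l with
  | nil => intro init; simp
  | cons x xs ih => intro init; simp [List.foldl_cons, ih, List.flatMap_cons]

theorem pv_foldl_snoc {α β : Type} (g : α → β) :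
    ∀ (l : List α) (init : List β), l.foldl (fun acc x => acc ++ [g x]) init = init ++ l.map g := by
  intro l
  induction l with
  | nil => intro init; simp
  | cons x xs ih => intro init; simp [List.foldl_cons, ih]

-- B's frontier fold computes the product, generalized over the starting frontier
theorem pv_fold_prod (path : List (String × List String × String)) :
    ∀ (C : List (List (String × String × String))),
      path.foldl (fun combos t =>
        combos.foldl (fun new_combos combo =>
          t.2.1.foldl (fun new_combos rel => new_combos ++ [combo ++ [(t.1, rel, t.2.2)]]) new_combos) []) C
      = C.flatMap (fun c => (pvProd path).map (fun d => c ++ d)) := by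
  induction path with
  | nil => intro C; simp [pvProd]
  | cons t r ih =>
    obtain ⟨node, rels, nxt⟩ := t
    intro C
    rw [List.foldl_cons, ih]
    have hstep : (C.foldl (fun new_combos combo =>
        rels.foldl (fun new_combos rel => new_combos ++ [combo ++ [(node, rel, nxt)]]) new_combos) [])
        = C.flatMap (fun combo => rels.map (fun rel => combo ++ [(node, rel, nxt)])) := by
      rw [pv_foldl_ext _ (fun acc combo => acc ++ rels.map (fun rel => combo ++ [(node, rel, nxt)]))
            (fun acc combo => pv_foldl_snoc (fun rel => combo ++ [(node, rel, nxt)]) rels acc) C []]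
      simpa using pv_foldl_append (fun combo => rels.map (fun rel => combo ++ [(node, rel, nxt)])) C []
    rw [hstep, List.flatMap_assoc]
    simp [pvProd, List.map_flatMap, List.flatMap_map, Function.comp_def, List.append_assoc]

theorem pv_both (cps : List (List (String × List String × String))) :
    expand_paths cps = expand_paths_alt cps := by
  unfold expand_paths expand_paths_alt
  apply pv_foldl_ext
  intro acc path
  rw [pv_main path path.length [] acc (by simp), pv_fold_prod path [[]]]
  simp

-- ===== VERDICT (by name: the statement is the Claim_ definition above) =====
theorem expand_paths_spec : Claim_equal_expand_paths := by
  intro cps _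
  unfold Spec_expand_paths
  exact pv_both cps
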